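-- pv_equiv track=rewrite | github.com/Gliese185C/CURS-III-SEM-II | TMPS/Lab1/Patterns/adapter.py | hostToIp
-- ===== SOURCE A (Python) =====
-- def hostToIp(host):
--     ip = host
--     new = [str(item) for item in range(1,10)]
--     for item in host:
--         if item not in new and item != "-":
--             ip = ip.replace(item, "")
--     ip = ip.replace("-",".")
--
--     return ip
-- ===== SOURCE B (Python) =====
-- import re
--
-- def hostToIp(host):
--     # delete every char outside [1-9-] in one regex pass, then dashes -> dots
--     return re.sub(r'[^1-9-]', '', host).replace('-', '.')
-- ===== Notes on version B (the rewrite author's own statement) =====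
-- stated objective: idiomatic
-- what changed: Replaces A's per-character loop that repeatedly rebuilds the whole string with str.replace by a single regex character-class deletion pass followed by one dash-to-dot replace.
import Mathlib
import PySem

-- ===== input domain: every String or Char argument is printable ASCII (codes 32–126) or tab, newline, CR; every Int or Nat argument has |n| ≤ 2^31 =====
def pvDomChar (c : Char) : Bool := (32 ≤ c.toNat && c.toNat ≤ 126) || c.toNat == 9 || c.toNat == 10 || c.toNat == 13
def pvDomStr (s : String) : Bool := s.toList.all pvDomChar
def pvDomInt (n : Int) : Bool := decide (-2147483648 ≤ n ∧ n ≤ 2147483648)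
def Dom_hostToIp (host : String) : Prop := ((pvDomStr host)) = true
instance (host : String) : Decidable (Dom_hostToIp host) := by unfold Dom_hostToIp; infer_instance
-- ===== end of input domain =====

-- B replaces A's per-character scan with repeated whole-string str.replace passes by a single
-- regex character-class deletion (ported as one filter pass) followed by one dash-to-dot replace.


-- ===== PORT A =====
-- new = [str(item) for item in range(1,10)]
def pvNew : List String := (PySem.List.pyRange 1 10 1).map PySem.Int.toStr

def hostToIp (host : String) : String :=
  -- ip = host; for item in host: if item not in new and item != "-": ip = ip.replace(item, "")
  let ip := host.toList.foldl
    (fun (ip : String) (item : Char) =>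
      if !(pvNew.contains (String.ofList [item])) && item != '-' then
        PySem.Str.replace ip (String.ofList [item]) ""
      else ip)
    host
  -- ip = ip.replace("-",".")
  PySem.Str.replace ip "-" "."

-- ===== PORT B =====
-- re.sub(r'[^1-9-]', '', host): the regex deletes each char outside the class [1-9-];
-- ported exactly as one filter pass keeping chars in '1'..'9' or '-'.
def hostToIp_alt (host : String) : String :=
  PySem.Str.replace
    (String.ofList (host.toList.filter (fun c => ('1' ≤ c && c ≤ '9') || c == '-')))
    "-" "."

-- ===== PRECONDITION & SPEC =====
def Spec_hostToIp (host : String) (out : String) : Prop := out = hostToIp_alt host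
instance (host : String) (out : String) : Decidable (Spec_hostToIp host out) := by unfold Spec_hostToIp; infer_instance

-- ===== CLAIM (what is proved, stated in full; the proofs are below) =====
def Claim_equal_hostToIp : Prop := ∀ (host : String), Dom_hostToIp host → Spec_hostToIp host (hostToIp host)

-- ===== LEMMAS AND PROOFS =====

-- replace.go with a single-char pattern, enough fuel: substitutes every occurrence
theorem replace_go_single (a : Char) (n : List Char) :
    ∀ (fuel : Nat) (l acc : List Char), l.length ≤ fuel →
      PySem.Chars.replace.go [a] n fuel l acc
        = acc.reverse ++ l.flatMap (fun c => if c = a then n else [c]) := by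
  intro fuel
  induction fuel with
  | zero =>
    intro l acc h
    have : l = [] := List.length_eq_zero_iff.mp (Nat.le_zero.mp h)
    subst this; simp [PySem.Chars.replace.go]
  | succ m ih =>
    intro l acc h
    cases l with
    | nil => simp [PySem.Chars.replace.go]
    | cons c t =>
      by_cases hc : c = a
      · subst hc
        have hpre : List.isPrefixOf [c] (c :: t) = true := by
          simp [List.isPrefixOf]
        simp only [PySem.Chars.replace.go, hpre, if_pos]
        rw [ih _ _ (by simpa using Nat.lt_succ_iff.mp (by simpa using h))]
        simp
      · have hpre : List.isPrefixOf [a] (c :: t) = false := by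
          simp [List.isPrefixOf, Ne.symm hc]
        simp only [PySem.Chars.replace.go, hpre, Bool.false_eq_true, if_neg, not_false_iff]
        rw [ih _ _ (by simpa using Nat.lt_succ_iff.mp (by simpa using h))]
        simp [hc]

theorem replace_single (a : Char) (n l : List Char) :
    PySem.Chars.replace l [a] n = l.flatMap (fun c => if c = a then n else [c]) := by
  rw [PySem.Chars.replace]
  simp only [List.isEmpty_cons, Bool.false_eq_true, if_neg, not_false_iff]
  exact replace_go_single a n l.length l [] le_rfl

theorem replace_del (a : Char) (l : List Char) :
    PySem.Chars.replace l [a] [] = l.filter (fun c => c != a) := by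
  rw [replace_single]
  induction l with
  | nil => rfl
  | cons c t ih => by_cases hc : c = a <;> simp [hc, ih]

-- equality of one-char strings is equality of the chars
theorem str1_beq (c d : Char) : (String.ofList [c] == String.ofList [d]) = (c == d) := by
  cases h : c == d
  · simp only [beq_eq_false_iff_ne] at h ⊢
    intro he
    exact h (by simpa [String.toList_ofList] using congrArg String.toList he)
  · simp only [beq_iff_eq] at h; subst h; simp

-- membership of a one-char string in ["1",…,"9"] is the range test '1' ≤ c ≤ '9'
theorem mem_pvNew (c : Char) :
    pvNew.contains (String.ofList [c]) = (('1' ≤ c) && (c ≤ '9')) := by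
  have hnew : pvNew = [String.ofList ['1'], String.ofList ['2'], String.ofList ['3'],
      String.ofList ['4'], String.ofList ['5'], String.ofList ['6'], String.ofList ['7'],
      String.ofList ['8'], String.ofList ['9']] := by decide
  rw [hnew]
  simp only [List.contains_cons, List.contains_nil, Bool.or_false, str1_beq]
  have hle : ∀ a b : Char, (a ≤ b) = decide (a.toNat ≤ b.toNat) := by
    intro a b
    simp only [eq_iff_iff, decide_eq_true_eq]
    exact Char.le_def.trans UInt32.le_iff_toNat_le
  have heq : ∀ d : Char, (c == d) = decide (c.toNat = d.toNat) := by
    intro d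
    cases h : c == d
    · simp only [beq_eq_false_iff_ne] at h
      symm
      simp only [decide_eq_false_iff_not]
      intro he
      exact h (Char.ext (UInt32.toNat_inj.mp he))
    · simp only [beq_iff_eq] at h; subst h; simp
  simp only [heq, hle,
    show Char.toNat '1' = 49 from rfl, show Char.toNat '2' = 50 from rfl,
    show Char.toNat '3' = 51 from rfl, show Char.toNat '4' = 52 from rfl,
    show Char.toNat '5' = 53 from rfl, show Char.toNat '6' = 54 from rfl,
    show Char.toNat '7' = 55 from rfl, show Char.toNat '8' = 56 from rfl,
    show Char.toNat '9' = 57 from rfl]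
  rw [Bool.eq_iff_iff]
  simp only [Bool.or_eq_true, Bool.and_eq_true, decide_eq_true_eq]
  omega

-- A's loop condition
def pvBad (c : Char) : Bool := !(pvNew.contains (String.ofList [c])) && c != '-'

-- A's loop, run from any starting string, filters out the bad chars of the iterated list
theorem loopA (l : List Char) :
    ∀ (s : String),
      (l.foldl
        (fun (ip : String) (item : Char) =>
          if !(pvNew.contains (String.ofList [item])) && item != '-' then
            PySem.Str.replace ip (String.ofList [item]) ""
          else ip) s).toList
      = s.toList.filter (fun c => !(pvBad c && l.contains c)) := by
  induction l with
  | nil => intro s; simp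
  | cons h t ih =>
    intro s
    rw [List.foldl_cons]
    have key : ∀ c : Char, (!(pvBad c && (h :: t).contains c))
        = ((if pvBad h then c != h else true) && !(pvBad c && t.contains c)) := by
      intro c
      by_cases hc : c = h
      · subst hc; cases hb : pvBad c <;> simp [hb]
      · simp only [List.contains_cons]
        rw [show (c == h) = false from by simpa using hc]
        cases hb : pvBad h <;> simp [hc]
    by_cases hb : pvBad h
    · rw [if_pos (by simpa [pvBad] using hb)]
      rw [ih]
      have : (PySem.Str.replace s (String.ofList [h]) "").toList
          = s.toList.filter (fun c => c != h) := by
        rw [PySem.Str.toList_replace, String.toList_ofList,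
          show ("" : String).toList = [] from rfl]
        exact replace_del h s.toList
      rw [this, List.filter_filter]
      apply List.filter_congr
      intro c _
      rw [key c, if_pos hb, Bool.and_comm]
    · rw [if_neg (by simpa [pvBad] using hb)]
      rw [ih]
      apply List.filter_congr
      intro c _
      rw [key c, if_neg hb, Bool.true_and]

theorem hostToIp_toList (host : String) :
    (hostToIp host).toList
      = (host.toList.filter (fun c => ('1' ≤ c && c ≤ '9') || c == '-')).flatMap
          (fun c => if c = '-' then ['.'] else [c]) := by
  show (PySem.Str.replace _ "-" ".").toList = _
  rw [PySem.Str.toList_replace]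
  rw [show ("-" : String).toList = ['-'] from rfl, show ("." : String).toList = ['.'] from rfl]
  rw [replace_single]
  congr 1
  rw [loopA]
  apply List.filter_congr
  intro c hc
  have hmem : host.toList.contains c = true := by simpa using hc
  rw [hmem, Bool.and_true, pvBad, mem_pvNew]
  cases h1 : ('1' ≤ c && c ≤ '9') <;> cases h2 : (c == '-') <;> simp_all

theorem hostToIp_alt_toList (host : String) :
    (hostToIp_alt host).toList
      = (host.toList.filter (fun c => ('1' ≤ c && c ≤ '9') || c == '-')).flatMap
          (fun c => if c = '-' then ['.'] else [c]) := by
  show (PySem.Str.replace _ "-" ".").toList = _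
  rw [PySem.Str.toList_replace, String.toList_ofList]
  rw [show ("-" : String).toList = ['-'] from rfl, show ("." : String).toList = ['.'] from rfl]
  rw [replace_single]

-- ===== VERDICT (by name: the statement is the Claim_ definition above) =====
theorem hostToIp_spec : Claim_equal_hostToIp := by
  intro host _
  show hostToIp host = hostToIp_alt host
  rw [← String.toList_inj, hostToIp_toList, hostToIp_alt_toList]
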